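-- pv_equiv track=rewrite | github.com/Zzzzzzues/QF-Projects | 3rd project - Portfolio Optimisation(Efficient Frontier)/efficient_frontier.py | parse_custom_tickers
-- ===== SOURCE A (Python) =====
-- from typing import List, Tuple
--
-- def parse_custom_tickers(raw: str) -> List[str]:
--     parts = [p.strip().upper() for p in raw.replace(",", " ").split() if p.strip()]
--     # de-dupe while preserving order
--     seen, out = set(), []
--     for t in parts:
--         if t not in seen:
--             seen.add(t)
--             out.append(t)
--     return out
-- ===== SOURCE B (Python) =====
-- def _nub(xs):
--     # recursive dedup: keep the head, delete ALL its later duplicates, recurse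
--     if not xs:
--         return []
--     head = xs[0]
--     return [head] + _nub([x for x in xs[1:] if x != head])
--
-- def parse_custom_tickers(raw: str):
--     parts = [p.strip().upper() for p in raw.replace(",", " ").split() if p.strip()]
--     return _nub(parts)
-- ===== Notes on version B (the rewrite author's own statement) =====
-- stated objective: alternative
-- what changed: A's single pass with a seen-set and output accumulator is replaced by structural recursion with no auxiliary state: keep the head, filter all later occurrences of it out of the tail, and recurse on the shrunken tail.
import Mathlib
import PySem

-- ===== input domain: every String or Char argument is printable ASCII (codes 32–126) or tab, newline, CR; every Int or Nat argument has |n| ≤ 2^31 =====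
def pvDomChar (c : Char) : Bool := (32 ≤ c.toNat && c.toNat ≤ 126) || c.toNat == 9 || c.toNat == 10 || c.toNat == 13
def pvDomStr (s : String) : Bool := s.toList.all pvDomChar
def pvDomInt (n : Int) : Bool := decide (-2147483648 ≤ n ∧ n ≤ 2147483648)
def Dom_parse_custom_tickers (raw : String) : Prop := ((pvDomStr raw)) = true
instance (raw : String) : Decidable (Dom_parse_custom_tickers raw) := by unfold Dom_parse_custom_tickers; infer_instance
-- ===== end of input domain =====

-- B replaces A's seen-set accumulation pass by stateless structural recursion
-- (keep the head, filter its duplicates out of the tail, recurse); alternative, not claimed faster.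

-- ===== PORT A =====
def parse_custom_tickers (raw : String) : List String :=
  let parts := ((PySem.Str.split₀ (PySem.Str.replace raw "," " ")).filter
      (fun p => !(PySem.Str.strip p == ""))).map (fun p => PySem.Str.upper (PySem.Str.strip p))
  let st := parts.foldl
    (fun (st : PySem.Set String × List String) t =>
      if PySem.Set.contains st.1 t then st else (PySem.Set.add st.1 t, st.2 ++ [t]))
    (PySem.Set.empty, [])
  st.2

-- ===== PORT B =====
-- recursive nub (Source B's _nub): termination because filtering does not lengthen the tail
def pvNub : List String → List String
  | [] => []
  | h :: t => h :: pvNub (t.filter (fun x => x != h))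
termination_by l => l.length
decreasing_by simpa using Nat.lt_succ_of_le (List.length_filter_le _ t)

def parse_custom_tickers_alt (raw : String) : List String :=
  let parts := ((PySem.Str.split₀ (PySem.Str.replace raw "," " ")).filter
      (fun p => !(PySem.Str.strip p == ""))).map (fun p => PySem.Str.upper (PySem.Str.strip p))
  pvNub parts

-- ===== PRECONDITION & SPEC =====
def Spec_parse_custom_tickers (raw : String) (out : List String) : Prop := out = parse_custom_tickers_alt raw
instance (raw : String) (out : List String) : Decidable (Spec_parse_custom_tickers raw out) := by unfold Spec_parse_custom_tickers; infer_instance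

-- ===== CLAIM =====
def Claim_equal_parse_custom_tickers : Prop := ∀ (raw : String), Dom_parse_custom_tickers raw → Spec_parse_custom_tickers raw (parse_custom_tickers raw)

-- ===== LEMMAS AND PROOFS =====

-- first-occurrence dedup of l relative to an already-seen prefix `pre`
def pvDD (pre l : List String) : List String :=
  match l with
  | [] => []
  | t :: l => if t ∈ pre then pvDD pre l else t :: pvDD (pre ++ [t]) l

theorem pvDD_congr (l : List String) : ∀ (pre pre' : List String),
    (∀ x, x ∈ pre ↔ x ∈ pre') → pvDD pre l = pvDD pre' l := by
  induction l with
  | nil => intro _ _ _; rfl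
  | cons t l ih =>
    intro pre pre' h
    simp only [pvDD]
    by_cases ht : t ∈ pre
    · rw [if_pos ht, if_pos ((h t).mp ht), ih pre pre' h]
    · rw [if_neg ht, if_neg (fun hc => ht ((h t).mpr hc))]
      exact congrArg _ (ih _ _ (by intro x; simp [h x]))

-- A's loop computes pvDD of its input relative to the seen set
theorem pvA_loop (l : List String) : ∀ (s : PySem.Set String) (out : List String),
    (l.foldl
      (fun (st : PySem.Set String × List String) t =>
        if PySem.Set.contains st.1 t then st else (PySem.Set.add st.1 t, st.2 ++ [t]))
      (s, out)).2 = out ++ pvDD s l := by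
  induction l with
  | nil => intro s out; simp [pvDD]
  | cons t l ih =>
    intro s out
    simp only [List.foldl_cons, pvDD]
    by_cases ht : t ∈ s
    · rw [if_pos ((PySem.Set.contains_iff _ _).mpr ht), if_pos ht, ih]
    · rw [if_neg (fun hc => ht ((PySem.Set.contains_iff _ _).mp hc)), if_neg ht, ih]
      have hdd : pvDD (PySem.Set.add s t) l = pvDD (s ++ [t]) l := by
        refine pvDD_congr l _ _ (fun x => ?_)
        simp only [PySem.Set.mem_add, List.mem_append, List.mem_singleton]
      rw [hdd]
      simp

-- pvDD relative to `pre` is pvNub of the list with pre's elements filtered out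
theorem pvDD_eq_nub (l : List String) : ∀ (pre : List String),
    pvDD pre l = pvNub (l.filter (fun x => !pre.contains x)) := by
  induction l with
  | nil => intro pre; simp [pvDD, pvNub]
  | cons t l ih =>
    intro pre
    simp only [pvDD, List.filter_cons]
    by_cases ht : t ∈ pre
    · rw [if_pos ht, ih pre]
      have : (!pre.contains t) = false := by simpa using ht
      rw [this]; simp
    · have hc : (!pre.contains t) = true := by simpa using ht
      rw [if_neg ht, hc, ih (pre ++ [t])]
      simp only [if_true, pvNub]
      congr 1
      rw [List.filter_filter]
      refine congrArg pvNub (List.filter_congr (fun x _ => ?_))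
      simp only [List.contains_append, Bool.not_or, List.contains_cons]
      cases hx : (x == t) <;> cases hp : pre.contains x <;>
        simp_all [beq_iff_eq, List.contains_eq_mem]

-- ===== VERDICT =====
theorem parse_custom_tickers_spec : Claim_equal_parse_custom_tickers := by
  intro raw _
  unfold Spec_parse_custom_tickers parse_custom_tickers parse_custom_tickers_alt
  simp only []
  rw [pvA_loop]
  have h := pvDD_eq_nub (((PySem.Str.split₀ (PySem.Str.replace raw "," " ")).filter
      (fun p => !(PySem.Str.strip p == ""))).map (fun p => PySem.Str.upper (PySem.Str.strip p))) []
  simp only [PySem.Set.empty] at *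
  rw [h]
  simp
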